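-- pv_equiv track=rewrite | github.com/NhaLeTruc/scylla-pg-cdc | src/reconciliation/differ.py | find_schema_differences
-- ===== SOURCE A (Python) =====
-- from typing import Dict, List, Any, Union, Optional, Tuple
--
-- def find_schema_differences(
--
--     source_data: List[Dict[str, Any]],
--     target_data: List[Dict[str, Any]]
-- ) -> Dict[str, List[str]]:
--     """
--     Find schema differences between datasets.
--
--     Args:
--         source_data: Source dataset
--         target_data: Target dataset
--
--     Returns:
--         Dictionary with:
--         - only_in_source: Fields only in source
--         - only_in_target: Fields only in target
--         - common_fields: Fields in both
--     """
--     if not source_data and not target_data: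
--         return {
--             "only_in_source": [],
--             "only_in_target": [],
--             "common_fields": []
--         }
--
--     # Aggregate all fields from all rows (not just first row)
--     source_fields = set()
--     if source_data:
--         for row in source_data:
--             source_fields.update(row.keys())
--
--     target_fields = set()
--     if target_data:
--         for row in target_data:
--             target_fields.update(row.keys())
--
--     return {
--         "only_in_source": sorted(source_fields - target_fields),
--         "only_in_target": sorted(target_fields - source_fields),
--         "common_fields": sorted(source_fields & target_fields)
--     }
-- ===== SOURCE B (Python) =====
-- def find_schema_differences(source_data, target_data):
--     # Sort the distinct field names of each side once, then classify them with a
--     # single two-pointer merge over the two sorted lists: equal heads -> common,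
--     # smaller head -> only on its side; leftovers after one list is exhausted are
--     # only on the other side. Output lists come out already sorted from the merge.
--     src = sorted({key for row in source_data for key in row})
--     tgt = sorted({key for row in target_data for key in row})
--     only_in_source, only_in_target, common_fields = [], [], []
--     i = j = 0
--     while i < len(src) and j < len(tgt):
--         if src[i] == tgt[j]:
--             common_fields.append(src[i])
--             i += 1
--             j += 1
--         elif src[i] < tgt[j]:
--             only_in_source.append(src[i])
--             i += 1
--         else:
--             only_in_target.append(tgt[j])
--             j += 1
--     only_in_source.extend(src[i:])
--     only_in_target.extend(tgt[j:])
--     return {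
--         "only_in_source": only_in_source,
--         "only_in_target": only_in_target,
--         "common_fields": common_fields,
--     }
-- ===== Notes on version B (the rewrite author's own statement) =====
-- stated objective: alternative
-- what changed: Replaces A's set-difference/intersection algebra plus three final sorts by sorting each side's distinct field names once and classifying all fields in a single two-pointer sorted-merge scan that emits the three output lists already in order.
import Mathlib
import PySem

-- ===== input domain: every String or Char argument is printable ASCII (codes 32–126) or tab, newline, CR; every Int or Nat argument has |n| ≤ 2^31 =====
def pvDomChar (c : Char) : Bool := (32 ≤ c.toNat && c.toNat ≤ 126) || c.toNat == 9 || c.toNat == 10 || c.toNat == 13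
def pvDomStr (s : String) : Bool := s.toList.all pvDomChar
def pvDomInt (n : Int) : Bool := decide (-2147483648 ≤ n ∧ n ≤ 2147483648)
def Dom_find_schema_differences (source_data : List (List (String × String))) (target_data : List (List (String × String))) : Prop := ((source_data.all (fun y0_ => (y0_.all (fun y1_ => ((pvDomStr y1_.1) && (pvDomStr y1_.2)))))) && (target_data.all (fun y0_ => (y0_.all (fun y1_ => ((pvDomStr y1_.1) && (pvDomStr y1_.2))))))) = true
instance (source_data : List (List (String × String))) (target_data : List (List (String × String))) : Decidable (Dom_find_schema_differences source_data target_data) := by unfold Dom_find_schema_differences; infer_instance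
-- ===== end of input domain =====

-- B drops A's set-difference/intersection algebra: it sorts each side's distinct field
-- names once and classifies everything in one two-pointer sorted-merge scan (alternative).

-- ===== PORT A =====
def find_schema_differences (source_data : List (List (String × String))) (target_data : List (List (String × String))) : List (String × List String) :=
  if source_data = [] ∧ target_data = [] then
    [("only_in_source", []), ("only_in_target", []), ("common_fields", [])]
  else
    let source_fields : PySem.Set String :=
      if source_data = [] then PySem.Set.empty
      else source_data.foldl (fun s row => PySem.Set.update s (row.map Prod.fst)) PySem.Set.empty
    let target_fields : PySem.Set String :=
      if target_data = [] then PySem.Set.empty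
      else target_data.foldl (fun s row => PySem.Set.update s (row.map Prod.fst)) PySem.Set.empty
    [("only_in_source", PySem.List.sorted (PySem.Set.diff source_fields target_fields) (fun x => x) false),
     ("only_in_target", PySem.List.sorted (PySem.Set.diff target_fields source_fields) (fun x => x) false),
     ("common_fields", PySem.List.sorted (PySem.Set.inter source_fields target_fields) (fun x => x) false)]

-- ===== PORT B =====
-- the two-pointer while loop of Source B, as recursion on the two remaining suffixes
def pvMergeClassify : List String → List String → (List String × List String × List String)
  | [], ys => ([], ys, [])
  | x :: xs, [] => (x :: xs, [], [])
  | x :: xs, y :: ys =>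
    if x = y then
      let r := pvMergeClassify xs ys
      (r.1, r.2.1, x :: r.2.2)
    else if x < y then
      let r := pvMergeClassify xs (y :: ys)
      (x :: r.1, r.2.1, r.2.2)
    else
      let r := pvMergeClassify (x :: xs) ys
      (r.1, y :: r.2.1, r.2.2)
termination_by xs ys => xs.length + ys.length

def find_schema_differences_alt (source_data : List (List (String × String))) (target_data : List (List (String × String))) : List (String × List String) :=
  let src := PySem.List.sorted (PySem.Set.ofList (source_data.flatMap (fun row => row.map Prod.fst))) (fun x => x) false
  let tgt := PySem.List.sorted (PySem.Set.ofList (target_data.flatMap (fun row => row.map Prod.fst))) (fun x => x) false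
  let r := pvMergeClassify src tgt
  [("only_in_source", r.1), ("only_in_target", r.2.1), ("common_fields", r.2.2)]

-- ===== PRECONDITION & SPEC =====
def Spec_find_schema_differences (source_data : List (List (String × String))) (target_data : List (List (String × String))) (out : List (String × List String)) : Prop := out = find_schema_differences_alt source_data target_data
instance (source_data : List (List (String × String))) (target_data : List (List (String × String))) (out : List (String × List String)) : Decidable (Spec_find_schema_differences source_data target_data out) := by unfold Spec_find_schema_differences; infer_instance

-- ===== CLAIM (what is proved, stated in full; the proofs are below) =====
def Claim_equal_find_schema_differences : Prop := ∀ (source_data : List (List (String × String))) (target_data : List (List (String × String))), Dom_find_schema_differences source_data target_data → Spec_find_schema_differences source_data target_data (find_schema_differences source_data target_data)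

-- ===== LEMMAS AND PROOFS =====

theorem pv_mem_setfold (l : List (List (String × String))) (s : PySem.Set String) (x : String) :
    x ∈ l.foldl (fun s row => PySem.Set.update s (row.map Prod.fst)) s ↔ x ∈ s ∨ x ∈ l.flatMap (fun row => row.map Prod.fst) := by
  induction l generalizing s with
  | nil => simp
  | cons row rest ih =>
      simp [List.foldl_cons, ih, PySem.Set.mem_update, or_assoc]

theorem pv_nodup_setfold (l : List (List (String × String))) (s : PySem.Set String) (hs : s.Nodup) :
    (l.foldl (fun s row => PySem.Set.update s (row.map Prod.fst)) s).Nodup := by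
  induction l generalizing s with
  | nil => exact hs
  | cons row rest ih => exact ih _ (PySem.Set.nodup_update _ _ hs)

-- filters whose predicate tests equality with an element no list member equals
theorem pv_filter_and_ne (l m : List String) (a : String) (h : ∀ z ∈ l, z ≠ a) :
    l.filter (fun z => !decide (z = a) && !decide (z ∈ m)) = l.filter (fun z => !decide (z ∈ m)) := by
  apply List.filter_congr; intro z hz; simp [h z hz]

theorem pv_filter_or_eq (l m : List String) (a : String) (h : ∀ z ∈ l, z ≠ a) :
    l.filter (fun z => decide (z = a) || decide (z ∈ m)) = l.filter (fun z => decide (z ∈ m)) := by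
  apply List.filter_congr; intro z hz; simp [h z hz]

-- the merge on strictly increasing lists computes exactly the two differences and the intersection
theorem pvMergeClassify_eq (xs ys : List String)
    (hx : xs.Pairwise (· < ·)) (hy : ys.Pairwise (· < ·)) :
    pvMergeClassify xs ys =
      (xs.filter (fun x => !(decide (x ∈ ys))),
       ys.filter (fun y => !(decide (y ∈ xs))),
       xs.filter (fun x => decide (x ∈ ys))) := by
  induction xs, ys using pvMergeClassify.induct with
  | case1 ys => simp [pvMergeClassify]
  | case2 x xs => simp [pvMergeClassify]
  | case3 xs y ys ih =>
      rw [List.pairwise_cons] at hx hy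
      have hxs : ∀ z ∈ xs, y < z := hx.1
      have hys : ∀ z ∈ ys, y < z := hy.1
      simp only [pvMergeClassify]
      rw [ih hx.2 hy.2]
      simp
      exact ⟨(pv_filter_and_ne xs ys y (fun z hz => ne_of_gt (hxs z hz))).symm,
             (pv_filter_and_ne ys xs y (fun z hz => ne_of_gt (hys z hz))).symm,
             (pv_filter_or_eq xs ys y (fun z hz => ne_of_gt (hxs z hz))).symm⟩
  | case4 x xs y ys hne hlt ih =>
      rw [List.pairwise_cons] at hx hy
      have hxs : ∀ z ∈ xs, x < z := hx.1
      have hys : ∀ z ∈ ys, y < z := hy.1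
      have hxy : ∀ z ∈ y :: ys, x < z := by
        intro z hz
        rcases List.mem_cons.mp hz with hm | hm
        · exact hm ▸ hlt
        · exact lt_trans hlt (hys z hm)
      have hxnot : ¬ (x = y ∨ x ∈ ys) := by
        rintro (hm | hm)
        · exact hne hm
        · exact absurd (hxy x (List.mem_cons.mpr (Or.inr hm))) (lt_irrefl x)
      have hq : ¬ y = x := fun e => hne e.symm
      have hB := pv_filter_and_ne ys xs x (fun z hz => ne_of_gt (lt_trans hlt (hys z hz)))
      simp only [pvMergeClassify, if_neg hne, if_pos hlt]
      rw [ih hx.2 (List.pairwise_cons.mpr hy)]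
      simp [List.filter_cons, List.mem_cons, hxnot]
      refine ⟨⟨hne, fun hm => hxnot (Or.inr hm)⟩, ?_⟩
      by_cases hyx : y ∈ xs <;> simp [hyx, hq, hB]
  | case5 x xs y ys hne hnlt ih =>
      have hlt : y < x := by
        rcases lt_trichotomy x y with hm | hm | hm
        · exact absurd hm hnlt
        · exact absurd hm hne
        · exact hm
      rw [List.pairwise_cons] at hx hy
      have hxs : ∀ z ∈ xs, x < z := hx.1
      have hyx : ∀ z ∈ x :: xs, y < z := by
        intro z hz
        rcases List.mem_cons.mp hz with hm | hm
        · exact hm ▸ hlt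
        · exact lt_trans hlt (hxs z hm)
      have hynot : ¬ (y = x ∨ y ∈ xs) := by
        rintro (hm | hm)
        · exact hne hm.symm
        · exact absurd (hyx y (List.mem_cons.mpr (Or.inr hm))) (lt_irrefl y)
      have hne' : ∀ z ∈ xs, z ≠ y := fun z hz => ne_of_gt (lt_trans hlt (hxs z hz))
      have hB1 := pv_filter_and_ne xs ys y hne'
      have hB3 := pv_filter_or_eq xs ys y hne'
      simp only [pvMergeClassify, if_neg hne, if_neg hnlt]
      rw [ih (List.pairwise_cons.mpr hx) hy.2]
      simp [List.filter_cons, List.mem_cons]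
      refine ⟨?_, ⟨fun e => hne e.symm, fun hm => hynot (Or.inr hm)⟩, ?_⟩
      · by_cases hxy : x ∈ ys <;> simp [hxy, hne, hB1]
      · by_cases hxy : x ∈ ys <;> simp [hxy, hne, hB3]

theorem find_schema_differences_spec' (source_data : List (List (String × String))) (target_data : List (List (String × String))) :
    find_schema_differences source_data target_data = find_schema_differences_alt source_data target_data := by
  by_cases h : source_data = [] ∧ target_data = []
  · obtain ⟨hs, ht⟩ := h; subst hs; subst ht
    have hn : PySem.List.sorted ([] : List String) (fun x => x) false = [] := rfl
    simp [find_schema_differences, find_schema_differences_alt, hn, pvMergeClassify]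
  · unfold find_schema_differences find_schema_differences_alt
    rw [if_neg h]
    simp only []
    set sf := source_data.foldl (fun s row => PySem.Set.update s (row.map Prod.fst)) PySem.Set.empty with hsf
    set tf := target_data.foldl (fun s row => PySem.Set.update s (row.map Prod.fst)) PySem.Set.empty with htf
    set src := PySem.List.sorted (PySem.Set.ofList (source_data.flatMap (fun row => row.map Prod.fst))) (fun x => x) false with hsrc
    set tgt := PySem.List.sorted (PySem.Set.ofList (target_data.flatMap (fun row => row.map Prod.fst))) (fun x => x) false with htgt
    have hsrcp : src.Pairwise (· < ·) := PySem.List.sorted_ofList_pairwise_lt _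
    have htgtp : tgt.Pairwise (· < ·) := PySem.List.sorted_ofList_pairwise_lt _
    have hsrcm : ∀ x, x ∈ src ↔ x ∈ source_data.flatMap (fun row => row.map Prod.fst) := by
      intro x; rw [hsrc, PySem.List.mem_sorted, PySem.Set.mem_ofList]
    have htgtm : ∀ x, x ∈ tgt ↔ x ∈ target_data.flatMap (fun row => row.map Prod.fst) := by
      intro x; rw [htgt, PySem.List.mem_sorted, PySem.Set.mem_ofList]
    have hsfm : ∀ x, x ∈ sf ↔ x ∈ source_data.flatMap (fun row => row.map Prod.fst) := by
      intro x; rw [hsf, pv_mem_setfold]; simp [PySem.Set.empty]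
    have htfm : ∀ x, x ∈ tf ↔ x ∈ target_data.flatMap (fun row => row.map Prod.fst) := by
      intro x; rw [htf, pv_mem_setfold]; simp [PySem.Set.empty]
    have hsfn : sf.Nodup := pv_nodup_setfold _ _ List.nodup_nil
    have htfn : tf.Nodup := pv_nodup_setfold _ _ List.nodup_nil
    have hsrcn : src.Nodup := hsrcp.imp ne_of_lt
    have htgtn : tgt.Nodup := htgtp.imp ne_of_lt
    have hifs : (if source_data = [] then (PySem.Set.empty : PySem.Set String) else sf) = sf := by
      split_ifs with hx
      · rw [hsf, hx]; rfl
      · rfl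
    have hift : (if target_data = [] then (PySem.Set.empty : PySem.Set String) else tf) = tf := by
      split_ifs with hx
      · rw [htf, hx]; rfl
      · rfl
    rw [hifs, hift, pvMergeClassify_eq src tgt hsrcp htgtp]
    simp only [List.cons.injEq, Prod.mk.injEq, true_and, and_true]
    refine ⟨?_, ?_, ?_⟩
    · apply PySem.List.sorted_eq_of_perm_of_pairwise_lt
      · refine (List.perm_ext_iff_of_nodup (hsrcn.filter _) (PySem.Set.nodup_diff _ _ hsfn)).mpr ?_
        intro x
        simp [List.mem_filter, PySem.Set.mem_diff, hsrcm, htgtm, hsfm, htfm]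
      · exact List.Pairwise.sublist List.filter_sublist hsrcp
    · apply PySem.List.sorted_eq_of_perm_of_pairwise_lt
      · refine (List.perm_ext_iff_of_nodup (htgtn.filter _) (PySem.Set.nodup_diff _ _ htfn)).mpr ?_
        intro x
        simp [List.mem_filter, PySem.Set.mem_diff, hsrcm, htgtm, hsfm, htfm]
      · exact List.Pairwise.sublist List.filter_sublist htgtp
    · apply PySem.List.sorted_eq_of_perm_of_pairwise_lt
      · refine (List.perm_ext_iff_of_nodup (hsrcn.filter _) (PySem.Set.nodup_inter _ _ hsfn)).mpr ?_
        intro x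
        simp [List.mem_filter, PySem.Set.mem_inter, hsrcm, htgtm, hsfm, htfm]
      · exact List.Pairwise.sublist List.filter_sublist hsrcp

-- ===== VERDICT (by name: the statement is the Claim_ definition above) =====
theorem find_schema_differences_spec : Claim_equal_find_schema_differences := by
  intro s t _
  unfold Spec_find_schema_differences
  exact find_schema_differences_spec' s t
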